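-- pv_equiv track=rewrite | github.com/rpmullig/Coding-Interview-Preparation | Python Cracking The Coding Interview Examples/Python Cracking The Coding Interview Examples/is_palindrome.py | even_case
-- ===== SOURCE A (Python) =====
-- def even_case(inputStr:str) -> bool:
--     '''
--     If even, then all letters must be even
--     '''
--     lettersDict = dict()
--     for c in inputStr:
--         if c is not ' ':
--             if c in lettersDict:
--                 lettersDict[c] += 1
--             else:
--                 lettersDict[c] = 1
--
--     for val in lettersDict.values():
--         if val % 2 != 0:
--             return False
--     return True
-- ===== SOURCE B (Python) =====
-- def even_case(inputStr: str) -> bool: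
--     odd = set()
--     for c in inputStr:
--         if c != ' ':
--             if c in odd:
--                 odd.remove(c)
--             else:
--                 odd.add(c)
--     return len(odd) == 0
-- ===== Notes on version B (the rewrite author's own statement) =====
-- stated objective: idiomatic
-- what changed: Replaces A's two-pass count-dictionary-then-parity-scan with a single pass maintaining a set of characters seen an odd number of times (toggle in/out) and returning whether that set is empty.
import Mathlib
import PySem

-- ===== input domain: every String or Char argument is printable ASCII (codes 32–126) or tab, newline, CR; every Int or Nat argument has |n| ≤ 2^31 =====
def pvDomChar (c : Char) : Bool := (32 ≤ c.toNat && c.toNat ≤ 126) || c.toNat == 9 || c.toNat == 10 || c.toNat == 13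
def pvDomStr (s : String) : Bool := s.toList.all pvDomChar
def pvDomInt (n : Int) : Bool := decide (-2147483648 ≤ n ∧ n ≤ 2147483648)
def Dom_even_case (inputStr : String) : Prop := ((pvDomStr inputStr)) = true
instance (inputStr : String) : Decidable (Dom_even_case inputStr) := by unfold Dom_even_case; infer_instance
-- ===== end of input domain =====

-- B replaces A's count-dict plus second parity-scan with a single-pass odd-parity toggle set (idiomatic; same O(n) cost).


-- ===== PORT A =====
-- the second loop: 'for val in …values(): if val % 2 != 0: return False / return True'
def evenCaseValsLoop : List Int → Bool
  | [] => true
  | v :: rest => if PySem.Int.mod v 2 ≠ 0 then false else evenCaseValsLoop rest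

def even_case (inputStr : String) : Bool :=
  let lettersDict : PySem.Dict Char Int :=
    inputStr.toList.foldl
      (fun d c =>
        if c ≠ ' ' then
          (if d.contains c then d.insert c (d.getD c 0 + 1) else d.insert c 1)
        else d)
      PySem.Dict.empty
  evenCaseValsLoop lettersDict.values

-- ===== PORT B =====
def even_case_alt (inputStr : String) : Bool :=
  let odd : PySem.Set Char :=
    inputStr.toList.foldl
      (fun s c =>
        if c ≠ ' ' then
          (if PySem.Set.contains s c then PySem.Set.discard s c else PySem.Set.add s c)
        else s)
      PySem.Set.empty
  PySem.Set.len odd == 0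

-- ===== PRECONDITION & SPEC =====
def Spec_even_case (inputStr : String) (out : Bool) : Prop := out = even_case_alt inputStr
instance (inputStr : String) (out : Bool) : Decidable (Spec_even_case inputStr out) := by unfold Spec_even_case; infer_instance

-- ===== CLAIM (what is proved, stated in full; the proofs are below) =====
def Claim_equal_even_case : Prop := ∀ (inputStr : String), Dom_even_case inputStr → Spec_even_case inputStr (even_case inputStr)

-- ===== LEMMAS AND PROOFS =====

-- A's counting step equals the canonical counter step (in the contains-branch getD is the stored
-- value; in the other branch getD is 0, so getD+1 = 1).
lemma even_case_step_eq :
    (fun (d : PySem.Dict Char Int) c =>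
      if d.contains c then d.insert c (d.getD c 0 + 1) else d.insert c 1)
    = (fun (d : PySem.Dict Char Int) c => d.insert c (d.getD c 0 + 1)) := by
  funext d c
  by_cases h : d.contains c
  · simp [h]
  · simp [h, PySem.Dict.getD_of_not_contains d 0 (by simpa using h)]

-- A's second loop returns true iff every value is even.
lemma evenCaseValsLoop_eq_true_iff (vs : List Int) :
    evenCaseValsLoop vs = true ↔ ∀ v ∈ vs, PySem.Int.mod v 2 = 0 := by
  induction vs with
  | nil => simp [evenCaseValsLoop]
  | cons v rest ih =>
    by_cases h : (2 : Int) ∣ v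
    · simp [evenCaseValsLoop, h, ih]
    · simp [evenCaseValsLoop, h]

-- the skip-space guard in both loops is a filter on the traversed list
lemma foldl_skip_space {β : Type} (f : β → Char → β) (l : List Char) (init : β) :
    l.foldl (fun b c => if c ≠ ' ' then f b c else b) init
      = (l.filter (fun c => decide (c ≠ ' '))).foldl f init := by
  induction l generalizing init with
  | nil => rfl
  | cons x xs ih =>
    by_cases hx : x = ' '
    · rw [List.foldl_cons, if_neg (by simp [hx]), List.filter_cons_of_neg (by simp [hx])]
      exact ih init
    · rw [List.foldl_cons, if_pos hx, List.filter_cons_of_pos (by simpa using hx),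
        List.foldl_cons]
      exact ih (f init x)

-- B's toggle loop: starting from a Nodup set s, the result is Nodup and contains c iff
-- (c ∈ s) xor (l.count c is odd).
lemma toggle_foldl_spec (l : List Char) :
    ∀ (s : PySem.Set Char), s.Nodup →
      (l.foldl (fun s c =>
          if PySem.Set.contains s c then PySem.Set.discard s c else PySem.Set.add s c) s).Nodup ∧
      ∀ c, c ∈ l.foldl (fun s c =>
          if PySem.Set.contains s c then PySem.Set.discard s c else PySem.Set.add s c) s ↔
        ((c ∈ s) ↔ l.count c % 2 = 0) := by
  induction l with
  | nil => intro s hs; simpa using hs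
  | cons x rest ih =>
    intro s hs
    simp only [List.foldl_cons]
    by_cases hx : PySem.Set.contains s x
    · have hxs : x ∈ s := (PySem.Set.contains_iff s x).mp hx
      rw [if_pos hx]
      obtain ⟨hnd, hmem⟩ := ih (PySem.Set.discard s x) (PySem.Set.nodup_discard s x hs)
      refine ⟨hnd, ?_⟩
      intro c
      rw [hmem c, PySem.Set.mem_discard]
      rcases eq_or_ne c x with rfl | hcx
      · simp [hxs, List.count_cons_self]; omega
      · simp [Ne.symm hcx, hcx]
    · have hxs : x ∉ s := fun h => hx ((PySem.Set.contains_iff s x).mpr h)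
      rw [if_neg hx]
      obtain ⟨hnd, hmem⟩ := ih (PySem.Set.add s x) (PySem.Set.nodup_add s x hs)
      refine ⟨hnd, ?_⟩
      intro c
      rw [hmem c, PySem.Set.mem_add]
      rcases eq_or_ne c x with rfl | hcx
      · simp [hxs, List.count_cons_self]; omega
      · simp [Ne.symm hcx, hcx]

-- the common characterisation: both programs decide 'every non-space char occurs an even number of times'
lemma even_case_eq_decide (s : String) :
    even_case s
      = decide (∀ c ∈ (s.toList.filter (fun c => decide (c ≠ ' '))),
          (s.toList.filter (fun c => decide (c ≠ ' '))).count c % 2 = 0) := by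
  set l := s.toList.filter (fun c => decide (c ≠ ' ')) with hl
  have hfold :
      s.toList.foldl
        (fun d c =>
          if c ≠ ' ' then
            (if d.contains c then d.insert c (d.getD c 0 + 1) else d.insert c 1)
          else d)
        PySem.Dict.empty
      = PySem.Dict.counter l := by
    rw [hl, foldl_skip_space, even_case_step_eq,
      PySem.Dict.foldl_insert_getD_add_one_eq_counter]
  rw [even_case, hfold]
  rw [Bool.eq_iff_iff, evenCaseValsLoop_eq_true_iff, decide_eq_true_iff]
  have hvals : (PySem.Dict.counter l).values
      = (PySem.Set.ofList l).map (fun k => ((l.count k : Int))) := by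
    simp [PySem.Dict.values, PySem.Dict.items_counter]
  rw [hvals]
  constructor
  · intro h c hc
    have := h _ (List.mem_map_of_mem ((PySem.Set.mem_ofList _ _).mpr hc))
    rw [PySem.Int.mod_eq_zero_iff_dvd] at this
    omega
  · intro h v hv
    obtain ⟨k, hk, rfl⟩ := List.mem_map.mp hv
    have := h k ((PySem.Set.mem_ofList _ _).mp hk)
    rw [PySem.Int.mod_eq_zero_iff_dvd]
    omega

lemma even_case_alt_eq_decide (s : String) :
    even_case_alt s
      = decide (∀ c ∈ (s.toList.filter (fun c => decide (c ≠ ' '))),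
          (s.toList.filter (fun c => decide (c ≠ ' '))).count c % 2 = 0) := by
  set l := s.toList.filter (fun c => decide (c ≠ ' ')) with hl
  have hfold :
      s.toList.foldl
        (fun t c =>
          if c ≠ ' ' then
            (if PySem.Set.contains t c then PySem.Set.discard t c else PySem.Set.add t c)
          else t)
        PySem.Set.empty
      = l.foldl (fun t c =>
          if PySem.Set.contains t c then PySem.Set.discard t c else PySem.Set.add t c)
        PySem.Set.empty := by
    rw [hl, foldl_skip_space]
  rw [even_case_alt, hfold]
  obtain ⟨-, hmem⟩ := toggle_foldl_spec l PySem.Set.empty (by simp [PySem.Set.empty])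
  rw [Bool.eq_iff_iff, beq_iff_eq, decide_eq_true_iff]
  have hempty : PySem.Set.len (l.foldl (fun t c =>
      if PySem.Set.contains t c then PySem.Set.discard t c else PySem.Set.add t c)
      PySem.Set.empty) = 0
      ↔ ∀ c, c ∉ l.foldl (fun t c =>
      if PySem.Set.contains t c then PySem.Set.discard t c else PySem.Set.add t c)
      PySem.Set.empty := by
    simp [PySem.Set.len, List.length_eq_zero_iff, List.eq_nil_iff_forall_not_mem]
  rw [hempty]
  constructor
  · intro h c hc
    have := h c
    rw [hmem c] at this
    simp only [PySem.Set.empty, List.not_mem_nil, false_iff] at this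
    omega
  · intro h c
    rw [hmem c]
    simp only [PySem.Set.empty, List.not_mem_nil, false_iff]
    intro hev
    by_cases hc : c ∈ l
    · exact absurd (h c hc) (by omega)
    · rw [List.count_eq_zero_of_not_mem hc] at hev; omega

-- ===== VERDICT (by name: the statement is the Claim_ definition above) =====
theorem even_case_spec : Claim_equal_even_case := by
  intro s _
  unfold Spec_even_case
  rw [even_case_eq_decide, even_case_alt_eq_decide]
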